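-- pv_equiv track=rewrite | github.com/Duxinyuan-max/Bilibili-code-python | 阿巴语翻译器.py | text_to_custom_binary
-- ===== SOURCE A (Python) =====
-- def text_to_custom_binary(text):
--     custom_result = []
--     for char in text:
--         unicode_val = ord(char)
--         binary_str = bin(unicode_val)[2:]
--         custom_binary_str = binary_str.replace('0', '阿').replace('1', '巴')
--         custom_result.append(custom_binary_str)
--     return ' '.join(custom_result)
-- ===== SOURCE B (Python) =====
-- def text_to_custom_binary(text):
--     def emit(n):
--         s = '巴' if n & 1 else '阿'
--         return s if n < 2 else emit(n >> 1) + s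
--     out = ''
--     for ch in text:
--         if out:
--             out += ' '
--         out += emit(ord(ch))
--     return out
-- ===== Notes on version B (the rewrite author's own statement) =====
-- stated objective: alternative
-- what changed: B replaces A's per-char bin() formatting plus two chained str.replace passes and a final join over a parts list by a recursive MSB-first bit emitter (emit(n>>1) plus the current bit's symbol) and a single accumulator string that inserts the space separator inline, so no parts list, no replace pass and no join are used.
import Mathlib
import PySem

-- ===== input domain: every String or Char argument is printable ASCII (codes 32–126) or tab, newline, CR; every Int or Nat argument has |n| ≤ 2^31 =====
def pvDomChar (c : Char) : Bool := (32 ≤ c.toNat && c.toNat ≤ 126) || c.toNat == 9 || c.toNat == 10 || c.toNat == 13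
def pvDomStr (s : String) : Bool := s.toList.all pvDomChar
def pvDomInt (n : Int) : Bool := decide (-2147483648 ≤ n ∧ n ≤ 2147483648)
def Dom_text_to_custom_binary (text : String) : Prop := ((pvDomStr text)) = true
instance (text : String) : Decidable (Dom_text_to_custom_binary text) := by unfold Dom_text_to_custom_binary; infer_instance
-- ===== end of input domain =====

-- B replaces A's bin()+two-replace+join formatting by an MSB-first recursive bit emitter over one accumulator string; alternative decomposition, same cost.

-- ===== PORT A =====
-- bin(n)[2:] for n ≥ 0, digits MSB-first ('0' for n = 0); hand port of the builtin, exact on Nat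
def pvBinRev (n : Nat) : List Char :=
  match n with
  | 0 => []
  | m + 1 => (if (m + 1) % 2 = 1 then '1' else '0') :: pvBinRev ((m + 1) / 2)

def pvBin (n : Nat) : List Char := if n = 0 then ['0'] else (pvBinRev n).reverse

def text_to_custom_binary (text : String) : String :=
  PySem.Str.join " "
    (text.toList.map (fun c =>
      PySem.Str.replace (PySem.Str.replace (String.ofList (pvBin c.toNat)) "0" "阿") "1" "巴"))

-- ===== PORT B =====
-- def emit(n): s = '巴' if n & 1 else '阿'; return s if n < 2 else emit(n >> 1) + s
def pvEmit (n : Nat) : List Char :=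
  let s : List Char := if n % 2 = 1 then ['巴'] else ['阿']
  if n < 2 then s else pvEmit (n / 2) ++ s
decreasing_by exact Nat.div_lt_self (by omega) (by omega)

-- out = ''; for ch in text: (if out: out += ' '); out += emit(ord(ch))
def text_to_custom_binary_alt (text : String) : String :=
  String.ofList
    (text.toList.foldl
      (fun out c => (if out.isEmpty then out else out ++ [' ']) ++ pvEmit c.toNat) [])

-- ===== PRECONDITION & SPEC =====
def Spec_text_to_custom_binary (text : String) (out : String) : Prop := out = text_to_custom_binary_alt text
instance (text : String) (out : String) : Decidable (Spec_text_to_custom_binary text out) := by unfold Spec_text_to_custom_binary; infer_instance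

-- ===== CLAIM (what is proved, stated in full; the proofs are below) =====
def Claim_equal_text_to_custom_binary : Prop := ∀ (text : String), Dom_text_to_custom_binary text → Spec_text_to_custom_binary text (text_to_custom_binary text)

-- ===== LEMMAS AND PROOFS =====

-- LSB-first symbol digits of n (proof-only characterisation shared by both sides)
def pvBitsRev (n : Nat) : List Char :=
  match n with
  | 0 => []
  | m + 1 => (if (m + 1) % 2 = 1 then '巴' else '阿') :: pvBitsRev ((m + 1) / 2)

-- single-char replace is a character-wise substitution
lemma replace_go_single (o : Char) (new : List Char) :
    ∀ (fuel : Nat) (l acc : List Char), l.length ≤ fuel →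
      PySem.Chars.replace.go [o] new fuel l acc =
        acc.reverse ++ l.flatMap (fun c => if c = o then new else [c]) := by
  intro fuel
  induction fuel with
  | zero =>
    intro l acc h
    have : l = [] := List.eq_nil_of_length_eq_zero (Nat.le_zero.mp h)
    subst this
    simp [PySem.Chars.replace.go]
  | succ f ih =>
    intro l acc h
    cases l with
    | nil => simp [PySem.Chars.replace.go]
    | cons c t =>
      by_cases hc : c = o
      · subst hc
        have hpre : List.isPrefixOf [c] (c :: t) = true := by simp [List.isPrefixOf]
        simp only [PySem.Chars.replace.go, hpre, if_true, List.length_cons, List.length_nil,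
          List.drop_succ_cons, List.drop_zero]
        rw [ih t (new.reverse ++ acc) (by simpa using Nat.le_of_succ_le_succ h)]
        simp
      · have hpre : List.isPrefixOf [o] (c :: t) = false := by
          simp [List.isPrefixOf]
          exact fun h' => absurd h'.symm hc
        simp only [PySem.Chars.replace.go, hpre, Bool.false_eq_true, if_false]
        rw [ih t (c :: acc) (by simpa using Nat.le_of_succ_le_succ h)]
        simp [hc]

lemma replace_single (s : List Char) (o : Char) (new : List Char) :
    PySem.Chars.replace s [o] new = s.flatMap (fun c => if c = o then new else [c]) := by
  simp only [PySem.Chars.replace, List.isEmpty_cons, Bool.false_eq_true, if_false]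
  simpa using replace_go_single o new s.length s [] (le_refl _)

lemma replace_single_char (s : List Char) (o r : Char) :
    PySem.Chars.replace s [o] [r] = s.map (fun c => if c = o then r else c) := by
  rw [replace_single]
  have h : (fun c => if c = o then [r] else [c]) = fun c => [if c = o then r else c] :=
    funext fun c => by split <;> rfl
  rw [h]
  induction s with
  | nil => rfl
  | cons a t ih => simp [List.flatMap_cons, ih]

-- the two substitutions turn the '0'/'1' digits into the symbol digits
lemma map_sub_pvBinRev : ∀ n : Nat,
    (pvBinRev n).map (fun c =>
        if (if c = '0' then '阿' else c) = '1' then '巴' else (if c = '0' then '阿' else c)) =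
      pvBitsRev n := by
  intro n
  induction n using Nat.strong_induction_on with
  | _ n ih =>
    match n with
    | 0 => simp [pvBinRev, pvBitsRev]
    | m + 1 =>
      rw [pvBinRev, pvBitsRev, List.map_cons]
      rw [ih ((m + 1) / 2) (Nat.div_lt_self (Nat.succ_pos m) (by omega))]
      by_cases hp : (m + 1) % 2 = 1
      · simp [hp]
      · simp [hp]

lemma pvBitsRev_pos (n : Nat) (h : n ≠ 0) :
    pvBitsRev n = (if n % 2 = 1 then '巴' else '阿') :: pvBitsRev (n / 2) := by
  match n, h with
  | m + 1, _ => rw [pvBitsRev]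

-- B's emitter produces exactly the MSB-first symbol digits
lemma pvEmit_eq (n : Nat) :
    pvEmit n = if n = 0 then ['阿'] else (pvBitsRev n).reverse := by
  induction n using Nat.strong_induction_on with
  | _ n ih =>
    match n with
    | 0 => simp [pvEmit]
    | 1 => simp [pvEmit, pvBitsRev]
    | m + 2 =>
      rw [pvEmit]
      have hd : (m + 2) / 2 < m + 2 := Nat.div_lt_self (by omega) (by omega)
      have hd0 : (m + 2) / 2 ≠ 0 := by omega
      rw [if_neg (show ¬ (m + 2 < 2) by omega), ih _ hd, if_neg hd0,
        if_neg (show ¬ (m + 2 = 0) by omega), pvBitsRev_pos (m + 2) (by omega),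
        List.reverse_cons]
      by_cases hp : (m + 2) % 2 = 1 <;> simp [hp] <;> (split <;> rfl)

-- per-character agreement of A's formatting with B's emitter
lemma perChar (n : Nat) :
    PySem.Chars.replace (PySem.Chars.replace (pvBin n) ['0'] ['阿']) ['1'] ['巴'] = pvEmit n := by
  rw [replace_single_char, replace_single_char, List.map_map, pvEmit_eq]
  by_cases h0 : n = 0
  · subst h0; simp [pvBin]
  · simp only [pvBin, h0, if_false, List.map_reverse]
    rw [show ((fun c => if c = '1' then '巴' else c) ∘ fun c => if c = '0' then '阿' else c) =
        (fun c => if (if c = '0' then '阿' else c) = '1' then '巴' else (if c = '0' then '阿' else c)) from rfl]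
    rw [map_sub_pvBinRev n]

lemma pvEmit_ne_nil (n : Nat) : pvEmit n ≠ [] := by
  rw [pvEmit_eq]
  by_cases h0 : n = 0
  · simp [h0]
  · simp only [h0, if_false]
    intro h
    have : pvBitsRev n = [] := by simpa using congrArg List.reverse h
    match n, this with
    | m + 1, h' => exact absurd h' (by simp [pvBitsRev])

-- B's fold, once the accumulator is nonempty, appends ' ' ++ emit for each remaining char
lemma foldl_sep (g : Char → List Char) :
    ∀ (l : List Char) (acc : List Char), acc ≠ [] →
      l.foldl (fun out c => (if out.isEmpty then out else out ++ [' ']) ++ g c) acc =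
        acc ++ l.flatMap (fun c => ' ' :: g c) := by
  intro l
  induction l with
  | nil => intro acc _; simp
  | cons c t ih =>
    intro acc hacc
    have he : acc.isEmpty = false := by simpa [List.isEmpty_iff] using hacc
    simp only [List.foldl_cons, he, Bool.false_eq_true, if_false]
    rw [ih (acc ++ [' '] ++ g c) (by simp)]
    simp [List.flatMap_cons]

-- ' '.join(map) equals the flatMap form with a leading first part
lemma join_sep (g : Char → List Char) :
    ∀ (l : List Char),
      PySem.Chars.join [' '] (l.map g) =
        match l with
        | [] => []
        | c :: t => g c ++ t.flatMap (fun c => ' ' :: g c) := by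
  intro l
  induction l with
  | nil => simp [PySem.Chars.join_nil]
  | cons c t ih =>
    cases t with
    | nil => simp [PySem.Chars.join_singleton]
    | cons d u =>
      simp only [List.map_cons] at ih ⊢
      rw [PySem.Chars.join_cons_cons, ih]
      simp [List.flatMap_cons]

-- ===== VERDICT (by name: the statement is the Claim_ definition above) =====
set_option maxHeartbeats 1000000 in
theorem text_to_custom_binary_spec : Claim_equal_text_to_custom_binary := by
  intro text _
  unfold Spec_text_to_custom_binary text_to_custom_binary text_to_custom_binary_alt
  have hA : ∀ c : Char,
      (PySem.Str.replace (PySem.Str.replace (String.ofList (pvBin c.toNat)) "0" "阿") "1" "巴").toList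
        = pvEmit c.toNat := by
    intro c
    simp only [PySem.Str.replace, String.toList_ofList]
    have h0 : ("0" : String).toList = ['0'] := rfl
    have h1 : ("1" : String).toList = ['1'] := rfl
    have ha : ("阿" : String).toList = ['阿'] := rfl
    have hb : ("巴" : String).toList = ['巴'] := rfl
    rw [h0, h1, ha, hb]
    exact perChar c.toNat
  set L := text.toList with hL
  have hLHS :
      (PySem.Str.join " "
        (L.map (fun c =>
          PySem.Str.replace (PySem.Str.replace (String.ofList (pvBin c.toNat)) "0" "阿") "1" "巴"))).toList
      = PySem.Chars.join [' '] (L.map (fun c => pvEmit c.toNat)) := by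
    rw [PySem.Str.toList_join]
    have hsep : (" " : String).toList = [' '] := rfl
    rw [hsep, List.map_map]
    refine congrArg (PySem.Chars.join [' ']) ?_
    exact List.map_congr_left fun c _ => hA c
  have hRHS :
      L.foldl (fun out c => (if out.isEmpty then out else out ++ [' ']) ++ pvEmit c.toNat) []
      = PySem.Chars.join [' '] (L.map (fun c => pvEmit c.toNat)) := by
    rw [join_sep (fun c => pvEmit c.toNat) L]
    cases L with
    | nil => simp
    | cons c t =>
      simp only [List.foldl_cons, List.isEmpty_nil, if_true, List.nil_append]
      exact foldl_sep (fun c => pvEmit c.toNat) t (pvEmit c.toNat) (pvEmit_ne_nil c.toNat)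
  rw [hRHS, ← hLHS, String.ofList_toList]
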